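-- pv_equiv track=rewrite | github.com/tomfletch/AdventOfCode2019 | 04/day_04_2.py | contains_double_digits
-- ===== SOURCE A (Python) =====
-- def contains_double_digits(password: str) -> bool:
--     current_digit = ''
--     current_digit_count = 0
--
--     for next_digit in password:
--         if next_digit != current_digit:
--             if current_digit_count == 2:
--                 return True
--
--             current_digit = next_digit
--             current_digit_count = 1
--         else:
--             current_digit_count += 1
--
--     return current_digit_count == 2
-- ===== SOURCE B (Python) =====
-- def contains_double_digits(password: str) -> bool:
--     p = [None, *password, None]
--     return any(a != b == c != d for a, b, c, d in zip(p, p[1:], p[2:], p[3:]))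
-- ===== Notes on version B (the rewrite author's own statement) =====
-- stated objective: alternative
-- what changed: Replaces A's stateful run counter with early return by a stateless scan: pad the string with None on both ends and test every 4-wide sliding window (via zip of shifted copies) for the pattern a != b == c != d, i.e. a maximal run of length exactly 2.
import Mathlib
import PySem

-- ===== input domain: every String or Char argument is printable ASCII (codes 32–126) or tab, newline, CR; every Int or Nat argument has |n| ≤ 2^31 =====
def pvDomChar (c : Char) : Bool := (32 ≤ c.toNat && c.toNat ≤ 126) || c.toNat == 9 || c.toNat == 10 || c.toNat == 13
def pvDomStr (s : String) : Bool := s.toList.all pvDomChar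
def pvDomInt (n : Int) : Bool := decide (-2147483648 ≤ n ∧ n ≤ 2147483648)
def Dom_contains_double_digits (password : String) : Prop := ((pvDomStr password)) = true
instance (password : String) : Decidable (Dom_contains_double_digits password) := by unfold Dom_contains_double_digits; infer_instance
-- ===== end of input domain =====

-- B replaces A's stateful run counter (with early return) by a stateless scan of all
-- 4-wide sliding windows of the None-padded string, looking for the pattern a≠b==c≠d.

-- ===== PORT A =====
-- Python one-char strings are modelled as List Char; '' is the empty list sentinel, as in A.
def cddLoopA : List Char → List Char → Nat → Bool
  | [], _, cnt => cnt == 2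
  | c :: rest, cur, cnt =>
    if [c] ≠ cur then
      if cnt == 2 then true
      else cddLoopA rest [c] 1
    else cddLoopA rest cur (cnt + 1)

def contains_double_digits (password : String) : Bool :=
  cddLoopA password.toList [] 0

-- ===== PORT B =====
-- zip(p, p[1:], p[2:], p[3:]) enumerates the 4-wide sliding windows of p; win4 is that
-- zip fused with the any(): it visits exactly those windows in order (exact on all inputs).
def win4 : List (Option Char) → Bool
  | a :: b :: c :: d :: rest => (a != b && b == c && c != d) || win4 (b :: c :: d :: rest)
  | _ => false

-- p = [None, *password, None]
def contains_double_digits_alt (password : String) : Bool :=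
  win4 ((none : Option Char) :: password.toList.map some ++ [none])

-- ===== PRECONDITION & SPEC =====
def Spec_contains_double_digits (password : String) (out : Bool) : Prop := out = contains_double_digits_alt password
instance (password : String) (out : Bool) : Decidable (Spec_contains_double_digits password out) := by unfold Spec_contains_double_digits; infer_instance

-- ===== CLAIM (what is proved, stated in full; the proofs are below) =====
def Claim_equal_contains_double_digits : Prop := ∀ (password : String), Dom_contains_double_digits password → Spec_contains_double_digits password (contains_double_digits password)

-- ===== LEMMAS AND PROOFS =====
-- windows starting at the head only use it through (head == second element)
theorem win4_head (a a' b : Option Char) (t : List (Option Char)) (h : (a == b) = (a' == b)) :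
    win4 (a :: b :: t) = win4 (a' :: b :: t) := by
  match t with
  | [] => simp [win4]
  | [c] => simp [win4]
  | c :: d :: t' => simp only [win4, bne, h]

-- a duplicated head never produces a hit at position 0
theorem win4_dup (a : Option Char) (t : List (Option Char)) :
    win4 (a :: a :: t) = win4 (a :: t) := by
  match t with
  | [] => simp [win4]
  | [c] => simp [win4]
  | c :: d :: t' => simp [win4]

-- a window whose middle pair differs is never a hit
theorem win4_mid (a b c : Option Char) (t : List (Option Char)) (h : (b == c) = false) :
    win4 (a :: b :: c :: t) = win4 (b :: c :: t) := by
  match t with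
  | [] => simp [win4]
  | e :: t' => simp [win4, h]

-- the padded run A's loop state (cur = d, cnt) stands for, capped at 3 (all longer runs scan alike)
def padA (d : Char) (cnt : Nat) (t : List (Option Char)) : List (Option Char) :=
  if cnt = 1 then none :: some d :: t
  else if cnt = 2 then none :: some d :: some d :: t
  else none :: some d :: some d :: some d :: t

theorem padA_one (d : Char) (t : List (Option Char)) : padA d 1 t = none :: some d :: t := rfl

theorem padA_two (d : Char) (t : List (Option Char)) :
    padA d 2 t = none :: some d :: some d :: t := rfl

theorem padA_big (d : Char) (n : Nat) (t : List (Option Char)) (h1 : n ≠ 1) (h2 : n ≠ 2) :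
    padA d n t = none :: some d :: some d :: some d :: t := by
  unfold padA
  rw [if_neg h1, if_neg h2]

-- Loop invariant: in state (cur = [d], cnt >= 1) A's loop equals B's window scan over
-- the remaining input preceded by the canonical padded run.
theorem loop_win (l : List Char) (d : Char) (cnt : Nat) (h : 1 <= cnt) :
    cddLoopA l [d] cnt = win4 (padA d cnt (l.map some ++ [none])) := by
  induction l generalizing d cnt with
  | nil =>
    match cnt, h with
    | 1, _ => simp [cddLoopA, padA, win4]
    | 2, _ => simp [cddLoopA, padA, win4]
    | (n+3), _ =>
      rw [padA_big d (n+3) _ (by omega) (by omega)]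
      simp [cddLoopA, win4]
  | cons x rest ih =>
    by_cases hx : x = d
    · subst hx
      have hA : cddLoopA (x :: rest) [x] cnt = cddLoopA rest [x] (cnt + 1) := by
        simp [cddLoopA]
      rw [hA, ih x (cnt+1) (by omega)]
      simp only [List.map_cons, List.cons_append]
      match cnt, h with
      | 1, _ => rw [padA_two, padA_one]
      | 2, _ => rw [padA_big x 3 _ (by omega) (by omega), padA_two]
      | (n+3), _ =>
        rw [padA_big x (n+3+1) _ (by omega) (by omega), padA_big x (n+3) _ (by omega) (by omega)]
        rw [show (none :: some x :: some x :: some x :: (some x :: (rest.map some ++ [none])) : List (Option Char))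
              = none :: some x :: some x :: some x :: some x :: (rest.map some ++ [none]) from rfl]
        simp only [win4, bne_self_eq_false, Bool.false_and, Bool.and_false, Bool.false_or]
    · have hxd : ([x] ≠ [d]) := by simp [hx]
      have hdx : ((some d : Option Char) == some x) = false := by
        simp [Ne.symm hx]
      match cnt, h with
      | 1, _ =>
        have hA : cddLoopA (x :: rest) [d] 1 = cddLoopA rest [x] 1 := by
          simp [cddLoopA, hxd]
        rw [hA, ih x 1 (by omega)]
        simp only [List.map_cons, List.cons_append]
        rw [padA_one, padA_one,
          win4_mid none (some d) (some x) _ hdx,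
          win4_head (some d) none (some x) _ (by simp [hdx])]
      | 2, _ =>
        have hA : cddLoopA (x :: rest) [d] 2 = true := by
          simp [cddLoopA, hxd]
        rw [hA]
        simp only [List.map_cons, List.cons_append]
        rw [padA_two]
        simp [win4, Ne.symm hx]
      | (n+3), _ =>
        have hA : cddLoopA (x :: rest) [d] (n+3) = cddLoopA rest [x] 1 := by
          simp [cddLoopA, hxd]
        rw [hA, ih x 1 (by omega)]
        simp only [List.map_cons, List.cons_append]
        rw [padA_one, padA_big d (n+3) _ (by omega) (by omega)]
        simp only [win4, bne_self_eq_false, Bool.false_and, Bool.and_false, Bool.false_or]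
        rw [win4_dup (some d) (some x :: (rest.map some ++ [none])),
          win4_head (some d) none (some x) _ (by simp [hdx])]

-- ===== VERDICT (by name: the statement is the Claim_ definition above) =====
theorem contains_double_digits_spec : Claim_equal_contains_double_digits := by
  intro password _
  unfold Spec_contains_double_digits contains_double_digits contains_double_digits_alt
  cases h : password.toList with
  | nil => simp [cddLoopA, win4]
  | cons c rest =>
    have hA : cddLoopA (c :: rest) [] 0 = cddLoopA rest [c] 1 := by
      simp [cddLoopA]
    rw [hA, loop_win rest c 1 (by omega), padA_one]
    simp
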